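-- pv_equiv track=rewrite | github.com/EPTLLC/brs-gpt | brsgpt/xss/waf_bypasser.py | _akamai_character_substitution_bypass
-- ===== SOURCE A (Python) =====
-- def _akamai_character_substitution_bypass(payload: str, variant: int = 0) -> str:
--     """Akamai character substitution bypass."""
--     substitutions = {
--         '<': '&lt;' if variant == 0 else '%3C',
--         '>': '&gt;' if variant == 0 else '%3E',
--         '"': '&quot;' if variant == 0 else '%22',
--         "'": '&#39;' if variant == 0 else '%27'
--     }
--
--     result = payload
--     for char, replacement in substitutions.items():
--         result = result.replace(char, replacement)
--     return result
-- ===== SOURCE B (Python) =====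
-- def _akamai_character_substitution_bypass(payload: str, variant: int = 0) -> str:
--     pieces = []
--     for c in payload:
--         if c == '<':
--             pieces.append('&lt;' if variant == 0 else '%3C')
--         elif c == '>':
--             pieces.append('&gt;' if variant == 0 else '%3E')
--         elif c == '"':
--             pieces.append('&quot;' if variant == 0 else '%22')
--         elif c == "'":
--             pieces.append('&#39;' if variant == 0 else '%27')
--         else:
--             pieces.append(c)
--     return ''.join(pieces)
-- ===== Notes on version B (the rewrite author's own statement) =====
-- stated objective: alternative
-- what changed: Drops the substitution dict and the four sequential full-string str.replace scans; B makes a single left-to-right pass over the payload, choosing each character's replacement with an explicit if/elif chain and joining the pieces.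
import Mathlib
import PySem

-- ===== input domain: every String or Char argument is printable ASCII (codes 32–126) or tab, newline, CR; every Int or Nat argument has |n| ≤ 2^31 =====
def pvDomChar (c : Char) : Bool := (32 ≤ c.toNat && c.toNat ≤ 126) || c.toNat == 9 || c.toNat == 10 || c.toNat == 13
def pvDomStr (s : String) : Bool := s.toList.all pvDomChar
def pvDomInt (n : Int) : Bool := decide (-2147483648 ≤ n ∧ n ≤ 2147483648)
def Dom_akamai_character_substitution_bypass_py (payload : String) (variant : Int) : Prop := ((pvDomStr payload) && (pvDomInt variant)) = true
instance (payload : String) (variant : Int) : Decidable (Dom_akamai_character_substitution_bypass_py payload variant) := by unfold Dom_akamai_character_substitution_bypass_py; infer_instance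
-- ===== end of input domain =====

-- B drops the substitution dict and A's four sequential str.replace scans in favour of one
-- left-to-right pass with an explicit if/elif chain (objective: alternative, same cost class).

-- ===== PORT A =====
-- the dict literal `substitutions`
def pvSubsA (variant : Int) : PySem.Dict String String :=
  PySem.Dict.ofList
    [ ("<", if variant == 0 then "&lt;" else "%3C")
    , (">", if variant == 0 then "&gt;" else "%3E")
    , ("\"", if variant == 0 then "&quot;" else "%22")
    , ("'", if variant == 0 then "&#39;" else "%27") ]

def akamai_character_substitution_bypass_py (payload : String) (variant : Int) : String :=
  -- result = payload; for char, replacement in substitutions.items(): result = result.replace(char, replacement)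
  (pvSubsA variant).items.foldl (fun result p => PySem.Str.replace result p.1 p.2) payload

-- ===== PORT B =====
-- the body of B's loop: the if/elif chain choosing the piece appended for one character
def pvPiece (variant : Int) (c : Char) : List Char :=
  if c == '<' then (if variant == 0 then "&lt;" else "%3C").toList
  else if c == '>' then (if variant == 0 then "&gt;" else "%3E").toList
  else if c == '"' then (if variant == 0 then "&quot;" else "%22").toList
  else if c == '\'' then (if variant == 0 then "&#39;" else "%27").toList
  else [c]

-- the single pass over the payload, concatenating the pieces (the loop + ''.join(pieces))
def pvPassB (variant : Int) : List Char → List Char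
  | [] => []
  | c :: rest => pvPiece variant c ++ pvPassB variant rest

def akamai_character_substitution_bypass_py_alt (payload : String) (variant : Int) : String :=
  String.mk (pvPassB variant payload.toList)

-- ===== PRECONDITION & SPEC =====
def Spec_akamai_character_substitution_bypass_py (payload : String) (variant : Int) (out : String) : Prop := out = akamai_character_substitution_bypass_py_alt payload variant
instance (payload : String) (variant : Int) (out : String) : Decidable (Spec_akamai_character_substitution_bypass_py payload variant out) := by unfold Spec_akamai_character_substitution_bypass_py; infer_instance

-- ===== CLAIM (what is proved, stated in full; the proofs are below) =====
def Claim_equal_akamai_character_substitution_bypass_py : Prop := ∀ (payload : String) (variant : Int), Dom_akamai_character_substitution_bypass_py payload variant → Spec_akamai_character_substitution_bypass_py payload variant (akamai_character_substitution_bypass_py payload variant)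

-- ===== LEMMAS AND PROOFS =====

-- replace with a single-character `old` is a per-character flatMap
theorem replace_go_single (k : Char) (new : List Char) :
    ∀ (fuel : Nat) (l acc : List Char), l.length ≤ fuel →
      PySem.Chars.replace.go [k] new fuel l acc
        = acc.reverse ++ l.flatMap (fun c => if c == k then new else [c]) := by
  intro fuel
  induction fuel with
  | zero =>
    intro l acc h
    have : l = [] := List.eq_nil_of_length_eq_zero (Nat.le_zero.mp h)
    subst this
    simp [PySem.Chars.replace.go]
  | succ n ih =>
    intro l acc h
    cases l with
    | nil => simp [PySem.Chars.replace.go]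
    | cons c t =>
      simp only [PySem.Chars.replace.go]
      by_cases hc : c = k
      · subst hc
        have hpre : [c].isPrefixOf (c :: t) = true := by simp [List.isPrefixOf]
        rw [if_pos hpre]
        have hd : List.drop [c].length (c :: t) = t := rfl
        have ht : t.length ≤ n := by simpa using h
        rw [hd, ih _ _ ht]
        simp
      · have hpre : [k].isPrefixOf (c :: t) = false := by
          simp only [List.isPrefixOf]
          simp [Ne.symm hc]
        rw [hpre]
        simp only [Bool.false_eq_true, if_false]
        have ht : t.length ≤ n := by simpa using h
        rw [ih _ _ ht]
        simp [hc]

theorem replace_single (l : List Char) (k : Char) (new : List Char) :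
    PySem.Chars.replace l [k] new = l.flatMap (fun c => if c == k then new else [c]) := by
  rw [PySem.Chars.replace]
  simp only [List.isEmpty_cons, Bool.false_eq_true, if_false]
  simpa using replace_go_single k new l.length l [] le_rfl

-- B's pass is a flatMap of the per-character chain
theorem pass_eq_flatMap (variant : Int) (l : List Char) :
    pvPassB variant l = l.flatMap (pvPiece variant) := by
  induction l with
  | nil => simp [pvPassB]
  | cons c t ih => simp [pvPassB, ih]

-- the four chained replaces amount to B's per-character chain
theorem per_char (variant : Int) (c : Char) :
    ((if c == '<' then (if variant == 0 then "&lt;" else "%3C").toList else [c]).flatMap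
      (fun d => (if d == '>' then (if variant == 0 then "&gt;" else "%3E").toList else [d]).flatMap
        (fun e => (if e == '"' then (if variant == 0 then "&quot;" else "%22").toList else [e]).flatMap
          (fun g => if g == '\'' then (if variant == 0 then "&#39;" else "%27").toList else [g]))))
      = pvPiece variant c := by
  by_cases h1 : c = '<'
  · subst h1
    by_cases hv : variant = 0
    · subst hv; decide
    · have hb : (variant == 0) = false := by simpa using hv
      simp only [pvPiece, hb]; decide
  by_cases h2 : c = '>'
  · subst h2
    by_cases hv : variant = 0
    · subst hv; decide
    · have hb : (variant == 0) = false := by simpa using hv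
      simp only [pvPiece, hb]; decide
  by_cases h3 : c = '"'
  · subst h3
    by_cases hv : variant = 0
    · subst hv; decide
    · have hb : (variant == 0) = false := by simpa using hv
      simp only [pvPiece, hb]; decide
  by_cases h4 : c = '\''
  · subst h4
    by_cases hv : variant = 0
    · subst hv; decide
    · have hb : (variant == 0) = false := by simpa using hv
      simp only [pvPiece, hb]; decide
  simp [pvPiece, h1, h2, h3, h4]

-- ===== VERDICT (by name: the statement is the Claim_ definition above) =====
theorem akamai_character_substitution_bypass_py_spec : Claim_equal_akamai_character_substitution_bypass_py := by
  intro payload variant _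
  unfold Spec_akamai_character_substitution_bypass_py
  unfold akamai_character_substitution_bypass_py akamai_character_substitution_bypass_py_alt pvSubsA
  apply String.toList_injective
  have hmk : (String.mk (pvPassB variant payload.toList)).toList = pvPassB variant payload.toList :=
    Eq.symm ((fun {l} {s} => String.ofList_eq.mp) rfl)
  rw [hmk, pass_eq_flatMap]
  have hitems : (PySem.Dict.ofList
      [ (("<" : String), if variant == 0 then "&lt;" else "%3C")
      , (">", if variant == 0 then "&gt;" else "%3E")
      , ("\"", if variant == 0 then "&quot;" else "%22")
      , ("'", if variant == 0 then "&#39;" else "%27") ]).items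
      = [ ("<", if variant == 0 then "&lt;" else "%3C")
        , (">", if variant == 0 then "&gt;" else "%3E")
        , ("\"", if variant == 0 then "&quot;" else "%22")
        , ("'", if variant == 0 then "&#39;" else "%27") ] := by
    by_cases hv : variant = 0 <;> simp [hv, PySem.Dict.ofList] <;> decide
  rw [hitems]
  simp only [List.foldl_cons, List.foldl_nil]
  rw [PySem.Str.toList_replace, PySem.Str.toList_replace, PySem.Str.toList_replace,
      PySem.Str.toList_replace]
  have hlt : ("<" : String).toList = ['<'] := rfl
  have hgt : (">" : String).toList = ['>'] := rfl
  have hq : ("\"" : String).toList = ['"'] := rfl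
  have ha : ("'" : String).toList = ['\''] := rfl
  rw [hlt, hgt, hq, ha]
  rw [replace_single, replace_single, replace_single, replace_single]
  rw [List.flatMap_assoc, List.flatMap_assoc, List.flatMap_assoc]
  apply List.flatMap_congr
  intro c _
  simpa using per_char variant c
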